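-- pv_equiv track=rewrite | github.com/micaeltoscano/PythonExercises | UFPB Exercises/contagem.py | contagem
-- ===== SOURCE A (Python) =====
-- def contagem(frase):
--     dic = {}
--
--     for letra in frase:
--
--         if letra in dic:
--             dic[letra] += 1
--
--         else:
--             dic[letra] = 1
--
--     return dic
-- ===== SOURCE B (Python) =====
-- def contagem(frase):
--     return {c: frase.count(c) for c in dict.fromkeys(frase)}
-- ===== Notes on version B (the rewrite author's own statement) =====
-- stated objective: idiomatic
-- what changed: Replaces the single accumulating dict pass with a dict comprehension that first computes the distinct characters in first-occurrence order (dict.fromkeys) and then counts each one with frase.count(c).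
import Mathlib
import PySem

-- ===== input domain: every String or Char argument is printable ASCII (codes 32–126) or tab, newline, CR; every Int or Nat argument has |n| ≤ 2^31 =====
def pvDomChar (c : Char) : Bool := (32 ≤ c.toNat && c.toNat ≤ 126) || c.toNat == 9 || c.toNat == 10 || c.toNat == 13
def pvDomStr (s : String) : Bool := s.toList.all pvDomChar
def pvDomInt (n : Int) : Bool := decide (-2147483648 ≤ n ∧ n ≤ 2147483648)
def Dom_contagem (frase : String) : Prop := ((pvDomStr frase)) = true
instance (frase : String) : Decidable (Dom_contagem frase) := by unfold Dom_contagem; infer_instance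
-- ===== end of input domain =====

-- B replaces A's single accumulating dict pass by a dict comprehension over the distinct
-- characters (first-occurrence order) counting each with frase.count(c) — more idiomatic, not faster.

-- ===== PORT A =====
-- A: dic = {}; for letra in frase: if letra in dic: dic[letra] += 1 else: dic[letra] = 1; return dic
def contagem (frase : String) : List (String × Int) :=
  (frase.toList.foldl
    (fun (dic : PySem.Dict String Int) letra0 =>
      let letra := String.ofList [letra0]
      if dic.contains letra then
        dic.insert letra (dic.getD letra 0 + 1)
      else
        dic.insert letra 1)
    PySem.Dict.empty).items

-- ===== PORT B =====
-- B: {c: frase.count(c) for c in dict.fromkeys(frase)}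
def contagem_alt (frase : String) : List (String × Int) :=
  (PySem.List.dedup frase.toList).map
    (fun c => (String.ofList [c], (PySem.Str.count frase (String.ofList [c]) : Int)))

-- ===== PRECONDITION & SPEC =====
def Spec_contagem (frase : String) (out : List (String × Int)) : Prop := out = contagem_alt frase
instance (frase : String) (out : List (String × Int)) : Decidable (Spec_contagem frase out) := by unfold Spec_contagem; infer_instance

-- ===== CLAIM (what is proved, stated in full; the proofs are below) =====
def Claim_equal_contagem : Prop := ∀ (frase : String), Dom_contagem frase → Spec_contagem frase (contagem frase)

-- ===== LEMMAS AND PROOFS =====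

-- the key 'letra' (a one-character Python string) is injective in the character
theorem pvKey_injective : Function.Injective (fun c : Char => String.ofList [c]) := by
  intro a b h
  simpa using congrArg String.toList h

-- A's two branches are one insert: when the key is absent, getD gives 0 and 0 + 1 = 1
theorem pvBranch_collapse (d : PySem.Dict String Int) (k : String) :
    (if d.contains k then d.insert k (d.getD k 0 + 1) else d.insert k 1) =
      d.insert k (d.getD k 0 + 1) := by
  by_cases h : d.contains k = true
  · simp [h]
  · simp only [Bool.not_eq_true] at h
    have h0 : d.getD k 0 = 0 := PySem.Dict.getD_of_not_contains d 0 h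
    simp [h, h0]

-- A's loop is Counter(map key frase)
theorem pvA_eq_counter (frase : String) :
    contagem frase =
      (PySem.Dict.counter (frase.toList.map (fun c => String.ofList [c]))).items := by
  unfold contagem
  rw [← PySem.Dict.foldl_insert_getD_add_one_eq_counter, List.foldl_map]
  have : (fun (dic : PySem.Dict String Int) letra0 =>
      let letra := String.ofList [letra0]
      if dic.contains letra then dic.insert letra (dic.getD letra 0 + 1)
      else dic.insert letra 1) =
      (fun (x : PySem.Dict String Int) (y : Char) =>
        x.insert (String.ofList [y]) (x.getD (String.ofList [y]) 0 + 1)) := by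
    funext d c
    exact pvBranch_collapse d (String.ofList [c])
  rw [this]

-- ordered dedup commutes with mapping an injective key
theorem pvOfList_map (l : List Char) :
    PySem.Set.ofList (l.map (fun c : Char => String.ofList [c])) =
      (PySem.List.dedup l).map (fun c : Char => String.ofList [c]) := by
  induction l using List.reverseRecOn with
  | nil => rfl
  | append_singleton xs x ih =>
    rw [List.map_append, List.map_singleton, PySem.Set.ofList_append_singleton,
        PySem.List.dedup_eq_ofList, PySem.Set.ofList_append_singleton]
    rw [PySem.List.dedup_eq_ofList] at ih
    by_cases hx : x ∈ PySem.Set.ofList xs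
    · rw [PySem.Set.add_of_mem hx, PySem.Set.add_of_mem, ih]
      rw [ih]; exact List.mem_map_of_mem hx
    · rw [PySem.Set.add_of_not_mem hx, PySem.Set.add_of_not_mem, ih, List.map_append,
          List.map_singleton]
      rw [ih]
      intro hmem
      obtain ⟨y, hy, hxy⟩ := List.mem_map.mp hmem
      exact hx (pvKey_injective hxy ▸ hy)

-- counting the one-character substring [c] is counting the character c
theorem pvCountGo (c : Char) (l : List Char) :
    ∀ (fuel acc : Nat), l.length ≤ fuel →
      PySem.Chars.count.go [c] fuel l acc = acc + l.count c := by
  induction l with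
  | nil =>
    intro fuel acc _
    cases fuel <;> simp [PySem.Chars.count.go]
  | cons h t ih =>
    intro fuel acc hf
    cases fuel with
    | zero => simp at hf
    | succ n =>
      simp only [List.length_cons, Nat.succ_le_succ_iff] at hf
      rw [PySem.Chars.count.go]
      by_cases hc : c = h
      · subst hc
        simp only [List.isPrefixOf, List.length_singleton, List.drop_succ_cons,
          List.drop_zero, beq_self_eq_true, Bool.true_and, if_pos]
        rw [ih n (acc + 1) hf, List.count_cons_self]
        omega
      · have : ([c].isPrefixOf (h :: t)) = false := by
          simp [List.isPrefixOf, hc]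
        rw [this]
        simp only [Bool.false_eq_true, if_false]
        rw [ih n acc hf, List.count_cons_of_ne (fun he => hc he.symm)]

theorem pvCharsCount_single (c : Char) (l : List Char) :
    PySem.Chars.count l [c] = l.count c := by
  rw [PySem.Chars.count]
  simp only [List.isEmpty_cons, Bool.false_eq_true, if_false]
  rw [pvCountGo c l l.length 0 (le_refl _)]; omega

-- ===== VERDICT (by name: the statement is the Claim_ definition above) =====
theorem contagem_spec : Claim_equal_contagem := by
  intro frase _
  unfold Spec_contagem contagem_alt
  rw [pvA_eq_counter, PySem.Dict.items_counter, pvOfList_map, List.map_map]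
  apply List.map_congr_left
  intro c hc
  simp only [Function.comp_apply]
  congr 1
  rw [List.count_map_of_injective _ _ pvKey_injective]
  have : PySem.Str.count frase (String.ofList [c]) = PySem.Chars.count frase.toList [c] := by
    simp [PySem.Str.count]
  rw [this, pvCharsCount_single]
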